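-- pv_equiv track=rewrite | github.com/ehddn5252/Algorithm | 백준/Silver/4659. 비밀번호 발음하기/비밀번호 발음하기.py | check_rule3
-- ===== SOURCE A (Python) =====
-- def check_rule3(str1):
--     tmp = '-21474836475151234'
--     tmp_stack = 1
--     for i in range(len(str1)):
--         # 같은 글자가 아니면 stack을 1로
--         if str1[i] != tmp:
--             tmp = str1[i]
--             tmp_stack = 1
--         else:
--             # 같은 글자면 stack이 올라감
--             tmp_stack += 1
--         # 스택이 2면 체크한다.
--         if tmp_stack == 2:
--             if str1[i] == 'e' or str1[i] == 'o':
--                 continue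
--             return False
--     return True
-- ===== SOURCE B (Python) =====
-- def check_rule3(str1):
--     # Per-character substring search: the password breaks the rule iff some
--     # character other than 'e'/'o' occurs doubled, i.e. c+c is a substring.
--     return all(c + c not in str1 for c in set(str1) if c != 'e' and c != 'o')
-- ===== Notes on version B (the rewrite author's own statement) =====
-- stated objective: alternative
-- what changed: Replaces A's single stateful left-to-right scan (current char + run-length counter) by a per-distinct-character substring search: for each character of set(str1) other than 'e'/'o', test whether its doubling c+c occurs as a substring.
import Mathlib
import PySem

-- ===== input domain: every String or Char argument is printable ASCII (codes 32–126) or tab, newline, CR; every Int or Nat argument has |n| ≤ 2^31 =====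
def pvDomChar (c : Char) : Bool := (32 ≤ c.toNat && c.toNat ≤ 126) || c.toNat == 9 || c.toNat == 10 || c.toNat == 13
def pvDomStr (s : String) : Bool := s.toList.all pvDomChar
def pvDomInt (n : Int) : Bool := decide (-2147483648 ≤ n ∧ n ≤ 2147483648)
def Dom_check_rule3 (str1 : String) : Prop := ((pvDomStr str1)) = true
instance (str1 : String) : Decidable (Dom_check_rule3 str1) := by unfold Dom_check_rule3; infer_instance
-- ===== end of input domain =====

-- B replaces A's stateful left-to-right scan (current char + run-length counter) by a
-- per-distinct-character substring search (c+c in str1 for each c in set(str1) \ {e,o});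
-- objective: alternative.

-- ===== PORT A =====
-- A's loop over i in range(len(str1)) with state (tmp, tmp_stack); tmp starts as a long
-- sentinel string that can never equal a single character, modelled as `none`.
def checkRule3Go : List Char → Option Char → Nat → Bool
  | [], _, _ => true
  | c :: rest, tmp, stack =>
    let st := if some c ≠ tmp then (some c, 1) else (tmp, stack + 1)
    if st.2 = 2 then
      if c = 'e' ∨ c = 'o' then checkRule3Go rest st.1 st.2
      else false
    else checkRule3Go rest st.1 st.2

def check_rule3 (str1 : String) : Bool := checkRule3Go str1.toList none 1

-- ===== PORT B =====
-- Python's two-character substring test 'c+c in str1', ported by hand (exact: scans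
-- every adjacent position, true iff some adjacent pair is (c, c)).
def hasSub2 (c : Char) : List Char → Bool
  | a :: b :: rest => (a == c && b == c) || hasSub2 c (b :: rest)
  | _ => false

-- all(c + c not in str1 for c in set(str1) if c != 'e' and c != 'o')
def check_rule3_alt (str1 : String) : Bool :=
  ((PySem.Set.ofList str1.toList).filter (fun c => c != 'e' && c != 'o')).all
    (fun c => !(hasSub2 c str1.toList))

-- ===== PRECONDITION & SPEC =====
def Spec_check_rule3 (str1 : String) (out : Bool) : Prop := out = check_rule3_alt str1
instance (str1 : String) (out : Bool) : Decidable (Spec_check_rule3 str1 out) := by unfold Spec_check_rule3; infer_instance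

-- ===== CLAIM (what is proved, stated in full; the proofs are below) =====
def Claim_equal_check_rule3 : Prop := ∀ (str1 : String), Dom_check_rule3 str1 → Spec_check_rule3 str1 (check_rule3 str1)

-- ===== LEMMAS AND PROOFS =====

def pairsAll (l : List Char) : Bool :=
  (l.zip l.tail).all (fun p => p.1 != p.2 || p.1 == 'e' || p.1 == 'o')

theorem checkRule3Go_eq (cs : List Char) : ∀ (t : Char) (k : Nat),
    (k = 1 ∨ (2 ≤ k ∧ (t = 'e' ∨ t = 'o'))) →
    checkRule3Go cs (some t) k = pairsAll (t :: cs) := by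
  induction cs with
  | nil => intro t k _; simp [checkRule3Go, pairsAll]
  | cons c rest ih =>
    intro t k hk
    by_cases hct : c = t
    · subst hct
      rcases hk with hk | ⟨hk2, heo⟩
      · subst hk
        simp only [checkRule3Go, pairsAll]
        by_cases heo : c = 'e' ∨ c = 'o'
        · simp only [ne_eq, not_true, if_false, if_pos heo]
          have := ih c 2 (Or.inr ⟨le_refl 2, heo⟩)
          simp [pairsAll] at this ⊢
          simp [this, heo]
        · simp only [ne_eq, not_true, if_false, if_neg heo]
          have h1 : c ≠ 'e' := fun h => heo (Or.inl h)
          have h2 : c ≠ 'o' := fun h => heo (Or.inr h)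
          simp [bne, h1, h2]
      · simp only [checkRule3Go]
        simp only [ne_eq, not_true, if_false]
        have hk3 : k + 1 ≠ 2 := by omega
        simp only [if_neg hk3]
        have := ih c (k + 1) (Or.inr ⟨by omega, heo⟩)
        simp [pairsAll] at this ⊢
        simp [this]
        rcases heo with h | h <;> simp [h]
    · simp only [checkRule3Go]
      have : some c ≠ some t := by simpa using hct
      simp only [if_pos this, if_neg (by omega : (1 : Nat) ≠ 2)]
      have := ih c 1 (Or.inl rfl)
      simp [pairsAll] at this ⊢
      simp [this]
      intro _
      exact Or.inl (Or.inl fun h => hct h.symm)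

theorem hasSub2_iff (c : Char) (l : List Char) :
    hasSub2 c l = true ↔ ∃ p ∈ l.zip l.tail, p.1 = c ∧ p.2 = c := by
  induction l with
  | nil => simp [hasSub2]
  | cons a tl ih =>
    cases tl with
    | nil => simp [hasSub2]
    | cons b rest =>
      simp only [hasSub2, Bool.or_eq_true, Bool.and_eq_true, beq_iff_eq, ih]
      constructor
      · rintro (⟨ha, hb⟩ | ⟨p, hp, h1, h2⟩)
        · exact ⟨(a, b), by simp, ha, hb⟩
        · exact ⟨p, by simp [List.zip] at hp ⊢; tauto, h1, h2⟩
      · rintro ⟨p, hp, h1, h2⟩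
        simp [List.zip] at hp
        rcases hp with hp | hp
        · subst hp; exact Or.inl ⟨h1, h2⟩
        · exact Or.inr ⟨p, by simpa [List.zip] using hp, h1, h2⟩

theorem alt_eq_pairsAll (s : String) : check_rule3_alt s = pairsAll s.toList := by
  set l := s.toList with hl
  have : (check_rule3_alt s = true) ↔ (pairsAll l = true) := by
    unfold check_rule3_alt pairsAll
    rw [← hl]
    simp only [List.all_eq_true, List.mem_filter, Bool.and_eq_true, bne_iff_ne, ne_eq,
      Bool.not_eq_true', Bool.or_eq_true, beq_iff_eq]
    constructor
    · intro h p hp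
      by_cases heq : p.1 = p.2
      · by_cases he : p.1 = 'e'
        · tauto
        · by_cases ho : p.1 = 'o'
          · tauto
          · exfalso
            have hmem : p.1 ∈ l := (List.of_mem_zip hp).1
            have hset : p.1 ∈ PySem.Set.ofList l := by
              rw [PySem.Set.mem_ofList]; exact hmem
            have := h p.1 ⟨hset, by simp [he, ho]⟩
            rw [← Bool.not_eq_true, hasSub2_iff] at this
            exact this ⟨p, hp, rfl, heq.symm ▸ heq ▸ rfl⟩
      · simp [heq]
    · intro h c hc
      rw [← Bool.not_eq_true, hasSub2_iff]
      rintro ⟨p, hp, h1, h2⟩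
      have h3 := h p hp
      rcases h3 with (hne | he) | ho
      · exact hne (h1.trans h2.symm)
      · exact hc.2.1 (h1.symm.trans he)
      · exact hc.2.2 (h1.symm.trans ho)
  cases hA : check_rule3_alt s <;> cases hB : pairsAll l <;> simp_all

-- ===== VERDICT (by name: the statement is the Claim_ definition above) =====
theorem check_rule3_spec : Claim_equal_check_rule3 := by
  intro str1 _
  unfold Spec_check_rule3
  rw [alt_eq_pairsAll]
  unfold check_rule3
  cases h : str1.toList with
  | nil => simp [checkRule3Go, pairsAll]
  | cons c cs =>
    simp only [checkRule3Go]
    simp only [ne_eq, reduceCtorEq, not_false_eq_true, if_pos, if_neg (by omega : (1 : Nat) ≠ 2)]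
    exact checkRule3Go_eq cs c 1 (Or.inl rfl)
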